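-- pv_equiv track=rewrite | github.com/yconsj/AI_Lora_Mobility | python_scripts/baselines3/basecase/basecase_plot_episode_log.py | create_jagged_line
-- ===== SOURCE A (Python) =====
-- def create_jagged_line(x_values, y_values):
--     """
--     Creates jagged lines for cumulative step-wise data.
--     """
--     jagged_x = []
--     jagged_y = []
--     for i in range(len(x_values)):
--         jagged_x.append(x_values[i])
--         jagged_y.append(y_values[i])
--         if i < len(x_values) - 1:
--             jagged_x.append(x_values[i + 1])
--             jagged_y.append(y_values[i])
--     return jagged_x, jagged_y
-- ===== SOURCE B (Python) =====
-- def create_jagged_line(x_values, y_values):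
--     """
--     Creates jagged lines for cumulative step-wise data.
--     Staged construction: interleave each point's x with its successor's x via
--     zip(x, x[1:]), duplicate each non-final y, then append the final point.
--     """
--     if not x_values:
--         return [], []
--     last = len(x_values) - 1
--     jagged_x = [v for pair in zip(x_values, x_values[1:]) for v in pair]
--     jagged_x.append(x_values[last])
--     jagged_y = [v for w in y_values[:last] for v in (w, w)]
--     jagged_y.append(y_values[last])
--     return jagged_x, jagged_y
-- ===== Notes on version B (the rewrite author's own statement) =====
-- stated objective: alternative
-- what changed: B has no index loop at all: it builds jagged_x by flattening zip(x_values, x_values[1:]), jagged_y by duplicating each element of y_values[:last], and appends the final point, replacing A's single indexed pass with an inner not-last conditional.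
import Mathlib
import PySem

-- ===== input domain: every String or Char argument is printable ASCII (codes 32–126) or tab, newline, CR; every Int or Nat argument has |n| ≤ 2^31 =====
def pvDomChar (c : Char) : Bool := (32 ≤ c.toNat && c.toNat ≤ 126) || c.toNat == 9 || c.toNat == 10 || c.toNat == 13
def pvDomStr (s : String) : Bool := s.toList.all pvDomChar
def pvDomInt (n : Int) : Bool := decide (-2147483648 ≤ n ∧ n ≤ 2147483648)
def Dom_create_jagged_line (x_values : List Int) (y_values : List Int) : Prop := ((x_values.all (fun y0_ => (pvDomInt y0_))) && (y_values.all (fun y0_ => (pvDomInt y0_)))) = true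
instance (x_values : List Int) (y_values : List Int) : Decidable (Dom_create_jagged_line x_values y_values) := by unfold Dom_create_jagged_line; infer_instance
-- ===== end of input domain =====

-- B drops A's indexed per-point loop entirely: it flattens zip(x, x[1:]) for the x-line,
-- duplicates each element of y[:last] for the y-line, and appends the final point.

-- ===== PORT A =====
def create_jagged_line (x_values : List Int) (y_values : List Int) : List Int × List Int :=
  (PySem.List.pyRange 0 (x_values.length : Int) 1).foldl
    (fun (acc : List Int × List Int) i =>
      let jx := acc.1 ++ [PySem.List.pyGetD x_values i 0]
      let jy := acc.2 ++ [PySem.List.pyGetD y_values i 0]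
      if i < (x_values.length : Int) - 1 then
        (jx ++ [PySem.List.pyGetD x_values (i + 1) 0],
         jy ++ [PySem.List.pyGetD y_values i 0])
      else (jx, jy))
    ([], [])

-- ===== PORT B =====
def create_jagged_line_alt (x_values : List Int) (y_values : List Int) : List Int × List Int :=
  if x_values = [] then ([], [])
  else
    let last : Int := (x_values.length : Int) - 1
    let jagged_x :=
      (x_values.zip (PySem.List.slice x_values (some 1) none)).flatMap (fun p => [p.1, p.2])
        ++ [PySem.List.pyGetD x_values last 0]
    let jagged_y :=
      (PySem.List.slice y_values none (some last)).flatMap (fun w => [w, w])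
        ++ [PySem.List.pyGetD y_values last 0]
    (jagged_x, jagged_y)

-- ===== PRECONDITION & SPEC =====
-- Pre_ excludes exactly the inputs where Python A raises IndexError (y_values shorter than x_values).
def Pre_create_jagged_line (x_values : List Int) (y_values : List Int) : Prop :=
  x_values.length ≤ y_values.length
instance (x_values : List Int) (y_values : List Int) : Decidable (Pre_create_jagged_line x_values y_values) := by unfold Pre_create_jagged_line; infer_instance

def pvWitness_create_jagged_line : List Int × List Int := ([1, 3, 6], [2, 5, 4])

def Spec_create_jagged_line (x_values : List Int) (y_values : List Int) (out : List Int × List Int) : Prop := out = create_jagged_line_alt x_values y_values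
instance (x_values : List Int) (y_values : List Int) (out : List Int × List Int) : Decidable (Spec_create_jagged_line x_values y_values out) := by unfold Spec_create_jagged_line; infer_instance

-- ===== CLAIM (what is proved, stated in full; the proofs are below) =====
def Claim_equal_create_jagged_line : Prop := ∀ (x_values : List Int) (y_values : List Int), Dom_create_jagged_line x_values y_values → Pre_create_jagged_line x_values y_values → Spec_create_jagged_line x_values y_values (create_jagged_line x_values y_values)

-- ===== LEMMAS AND PROOFS =====

-- shift a flatMap over range(1, m+1) down to range(0, m)
theorem flatMap_pyRange_shift (m : Int) (g : Int → List Int) :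
    (PySem.List.pyRange 1 (m + 1) 1).flatMap g
      = (PySem.List.pyRange 0 m 1).flatMap (fun i => g (i + 1)) := by
  rw [PySem.List.pyRange_one 1 (m + 1), PySem.List.pyRange_one 0 m]
  simp only [List.flatMap_map]
  have : m + 1 - 1 = m - 0 := by ring
  rw [this]
  apply List.flatMap_congr
  intro k _
  ring_nf

-- A's x-component in closed form equals B's zip construction (x nonempty)
theorem jx_closed (x : List Int) (hx : x ≠ []) :
    (PySem.List.pyRange 0 (x.length : Int) 1).flatMap
      (fun i => [PySem.List.pyGetD x i 0]
        ++ (if i < (x.length : Int) - 1 then [PySem.List.pyGetD x (i + 1) 0] else []))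
      = (x.zip x.tail).flatMap (fun p => [p.1, p.2])
        ++ [PySem.List.pyGetD x ((x.length : Int) - 1) 0] := by
  induction x with
  | nil => exact absurd rfl hx
  | cons a t ih =>
    cases t with
    | nil =>
      have h01 : PySem.List.pyRange 0 1 1 = [0] := by decide
      simp [h01]
    | cons b t' =>
      have hlen : ((a :: b :: t').length : Int) = ((b :: t').length : Int) + 1 := by
        simp
      rw [PySem.List.pyRange_one_cons (by simp only [List.length_cons]; push_cast; omega : (0:Int) < ((a :: b :: t').length : Int))]
      rw [List.flatMap_cons]
      rw [show (0:Int) + 1 = 1 from by norm_num]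
      rw [hlen, flatMap_pyRange_shift]
      have hbody : ∀ i ∈ PySem.List.pyRange 0 ((b :: t').length : Int) 1,
          (fun i => [PySem.List.pyGetD (a :: b :: t') i 0]
            ++ (if i < ((b :: t').length : Int) + 1 - 1 then [PySem.List.pyGetD (a :: b :: t') (i + 1) 0] else [])) (i + 1)
          = [PySem.List.pyGetD (b :: t') i 0]
            ++ (if i < ((b :: t').length : Int) - 1 then [PySem.List.pyGetD (b :: t') (i + 1) 0] else []) := by
        intro i hi
        have hmem := (PySem.List.mem_pyRange_one).mp hi
        obtain ⟨k, hk⟩ : ∃ k : Nat, i = (k : Nat) := ⟨i.toNat, by omega⟩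
        subst hk
        have h1 : ((k : Int) + 1) = ((k + 1 : Nat) : Int) := by push_cast; ring
        have h2 : (((k + 1 : Nat) : Int) + 1) = ((k + 2 : Nat) : Int) := by push_cast; ring
        simp only [h1, h2, PySem.List.pyGetD_natCast]
        have hif : ((k : Int) + 1 < ((b :: t').length : Int) + 1 - 1) ↔ ((k : Int) < ((b :: t').length : Int) - 1) := by omega
        simp only [List.getD_cons_succ]
        split_ifs with hc hd hd
        · rfl
        · exact absurd (hif.mp hc) hd
        · exact absurd (hif.mpr hd) hc
        · rfl
      rw [List.flatMap_congr hbody]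
      rw [ih (by simp)]
      have hfirst : [PySem.List.pyGetD (a :: b :: t') 0 0]
          ++ (if (0:Int) < ((b :: t').length : Int) + 1 - 1 then [PySem.List.pyGetD (a :: b :: t') 1 0] else [])
          = [a, b] := by
        rw [if_pos (by simp only [List.length_cons]; push_cast; omega)]
        rw [show (1:Int) = ((1 : Nat) : Int) from by norm_num, PySem.List.pyGetD_natCast]
        simp [PySem.List.pyGetD_zero_cons]
      rw [hfirst]
      have hz : (a :: b :: t').zip (a :: b :: t').tail = (a, b) :: (b :: t').zip (b :: t').tail := rfl
      rw [hz, List.flatMap_cons]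
      have hlast2 : PySem.List.pyGetD (a :: b :: t') (((b :: t').length : Int) + 1 - 1) 0
          = PySem.List.pyGetD (b :: t') (((b :: t').length : Int) - 1) 0 := by
        have e1 : ((b :: t').length : Int) + 1 - 1 = (((b :: t').length : Nat) : Int) := by ring
        have e2 : ((b :: t').length : Int) - 1 = ((t'.length : Nat) : Int) := by
          simp only [List.length_cons]; push_cast; ring
        rw [e1, e2, PySem.List.pyGetD_natCast, PySem.List.pyGetD_natCast]
        simp only [List.length_cons, List.getD_cons_succ]
      rw [hlast2]
      exact (List.append_assoc _ _ _).symm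

-- A's y-component in closed form equals B's duplication construction (x nonempty, len x ≤ len y)
theorem jy_closed (n : Nat) (y : List Int) (hn : 1 ≤ n) (hlen : n ≤ y.length) :
    (PySem.List.pyRange 0 (n : Int) 1).flatMap
      (fun i => [PySem.List.pyGetD y i 0]
        ++ (if i < (n : Int) - 1 then [PySem.List.pyGetD y i 0] else []))
      = (y.take (n - 1)).flatMap (fun w => [w, w]) ++ [PySem.List.pyGetD y ((n : Int) - 1) 0] := by
  induction n generalizing y with
  | zero => omega
  | succ m ih =>
    cases y with
    | nil => simp at hlen
    | cons b t =>
      cases m with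
      | zero =>
        have h01 : PySem.List.pyRange 0 1 1 = [0] := by decide
        simp [h01]
      | succ m' =>
        rw [PySem.List.pyRange_one_cons (by push_cast; omega : (0:Int) < ((m' + 1 + 1 : Nat) : Int))]
        rw [List.flatMap_cons]
        rw [show (0:Int) + 1 = 1 from by norm_num]
        have hshift : ((m' + 1 + 1 : Nat) : Int) = ((m' + 1 : Nat) : Int) + 1 := by push_cast; ring
        rw [hshift, flatMap_pyRange_shift]
        have hbody : ∀ i ∈ PySem.List.pyRange 0 ((m' + 1 : Nat) : Int) 1,
            (fun i => [PySem.List.pyGetD (b :: t) i 0]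
              ++ (if i < ((m' + 1 : Nat) : Int) + 1 - 1 then [PySem.List.pyGetD (b :: t) i 0] else [])) (i + 1)
            = [PySem.List.pyGetD t i 0]
              ++ (if i < ((m' + 1 : Nat) : Int) - 1 then [PySem.List.pyGetD t i 0] else []) := by
          intro i hi
          have hmem := (PySem.List.mem_pyRange_one).mp hi
          obtain ⟨k, hk⟩ : ∃ k : Nat, i = (k : Nat) := ⟨i.toNat, by omega⟩
          subst hk
          have h1 : ((k : Int) + 1) = ((k + 1 : Nat) : Int) := by push_cast; ring
          simp only [h1, PySem.List.pyGetD_natCast, List.getD_cons_succ]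
          have hif : ((k + 1 : Nat) : Int) < ((m' + 1 : Nat) : Int) + 1 - 1 ↔ ((k : Int) < ((m' + 1 : Nat) : Int) - 1) := by push_cast; omega
          split_ifs with hc hd hd
          · rfl
          · exact absurd (hif.mp hc) hd
          · exact absurd (hif.mpr hd) hc
          · rfl
        rw [List.flatMap_congr hbody]
        rw [ih t (by omega) (by simpa using Nat.lt_of_succ_le hlen)]
        have hfirst : [PySem.List.pyGetD (b :: t) 0 0]
            ++ (if (0:Int) < ((m' + 1 : Nat) : Int) + 1 - 1 then [PySem.List.pyGetD (b :: t) 0 0] else [])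
            = [b, b] := by
          rw [if_pos (by push_cast; omega)]
          simp [PySem.List.pyGetD_zero_cons]
        rw [hfirst]
        have htake : (b :: t).take (m' + 1 + 1 - 1) = b :: t.take (m' + 1 - 1) := by
          simp
        have e : ((m' + 1 : Nat) : Int) + 1 - 1 = ((m' + 1 : Nat) : Int) := by ring
        have hgetD : PySem.List.pyGetD (b :: t) ((m' + 1 : Nat) : Int) 0 = PySem.List.pyGetD t (((m' + 1 : Nat) : Int) - 1) 0 := by
          have h1 : ((m' + 1 : Nat) : Int) - 1 = ((m' : Nat) : Int) := by push_cast; ring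
          rw [h1, PySem.List.pyGetD_natCast, PySem.List.pyGetD_natCast]
          simp only [List.getD_cons_succ]
        rw [htake, e, hgetD, List.flatMap_cons]
        simp

theorem create_jagged_line_eq (x y : List Int) (h : x.length ≤ y.length) :
    create_jagged_line x y = create_jagged_line_alt x y := by
  by_cases hx : x = []
  · subst hx
    simp [create_jagged_line, create_jagged_line_alt,
      PySem.List.pyRange_one_eq_nil (le_refl (0 : Int))]
  · unfold create_jagged_line create_jagged_line_alt
    rw [if_neg hx]
    have hbody :
        (fun (acc : List Int × List Int) i =>
          let jx := acc.1 ++ [PySem.List.pyGetD x i 0]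
          let jy := acc.2 ++ [PySem.List.pyGetD y i 0]
          if i < (x.length : Int) - 1 then
            (jx ++ [PySem.List.pyGetD x (i + 1) 0],
             jy ++ [PySem.List.pyGetD y i 0])
          else (jx, jy))
        = (fun (acc : List Int × List Int) i =>
            (acc.1 ++ ([PySem.List.pyGetD x i 0]
              ++ (if i < (x.length : Int) - 1 then [PySem.List.pyGetD x (i + 1) 0] else [])),
             acc.2 ++ ([PySem.List.pyGetD y i 0]
              ++ (if i < (x.length : Int) - 1 then [PySem.List.pyGetD y i 0] else [])))) := by
      funext acc i
      split_ifs <;> simp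
    rw [hbody]
    rw [PySem.List.foldl_prod_mk
      (f := fun acc i => acc ++ ([PySem.List.pyGetD x i 0]
        ++ (if i < (x.length : Int) - 1 then [PySem.List.pyGetD x (i + 1) 0] else [])))
      (g := fun acc i => acc ++ ([PySem.List.pyGetD y i 0]
        ++ (if i < (x.length : Int) - 1 then [PySem.List.pyGetD y i 0] else [])))]
    rw [PySem.List.foldl_append_eq_flatMap, PySem.List.foldl_append_eq_flatMap]
    simp only [List.nil_append]
    have hx1 : 1 ≤ x.length := List.length_pos_iff.mpr hx
    have hlast : ((x.length : Int) - 1) = ((x.length - 1 : Nat) : Int) := by omega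
    simp only [PySem.List.slice_from_one]
    refine Prod.ext ?_ ?_
    · exact jx_closed x hx
    · show List.flatMap _ _ = _
      rw [jy_closed x.length y hx1 h]
      rw [hlast, PySem.List.slice_to_natCast]

-- ===== VERDICT (by name: the statement is the Claim_ definition above) =====
theorem create_jagged_line_spec : Claim_equal_create_jagged_line := by
  intro x y _ hpre
  unfold Spec_create_jagged_line
  exact create_jagged_line_eq x y hpre
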